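-- pv_equiv track=rewrite | github.com/lesleslie/crackerjack | crackerjack/adapters/lsp/zuban.py | _extract_severity_and_message
-- ===== SOURCE A (Python) =====
-- def _extract_severity_and_message(working_message: str) -> tuple[str, str]:
--     """Extract severity indicator and remaining message."""
--     severity_indicators = ["error:", "warning:", "note:", "info:"]
--
--     for indicator in severity_indicators:
--         if working_message.lower().startswith(indicator):
--             severity = indicator[:-1]  # Remove colon
--             message = working_message[len(indicator) :].strip()
--             return severity, message
--
--     # Default to error severity
--     return "error", working_message
-- ===== SOURCE B (Python) =====
-- def _extract_severity_and_message(working_message: str) -> tuple[str, str]: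
--     head, sep, tail = working_message.partition(":")
--     if sep and head.lower() in ("error", "warning", "note", "info"):
--         return head.lower(), tail.strip()
--     return "error", working_message
-- ===== Notes on version B (the rewrite author's own statement) =====
-- stated objective: idiomatic
-- what changed: A's loop over the four severity indicator prefixes with lower().startswith is replaced by a single partition at the first colon plus one set-membership test on the lowered head.
import Mathlib
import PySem

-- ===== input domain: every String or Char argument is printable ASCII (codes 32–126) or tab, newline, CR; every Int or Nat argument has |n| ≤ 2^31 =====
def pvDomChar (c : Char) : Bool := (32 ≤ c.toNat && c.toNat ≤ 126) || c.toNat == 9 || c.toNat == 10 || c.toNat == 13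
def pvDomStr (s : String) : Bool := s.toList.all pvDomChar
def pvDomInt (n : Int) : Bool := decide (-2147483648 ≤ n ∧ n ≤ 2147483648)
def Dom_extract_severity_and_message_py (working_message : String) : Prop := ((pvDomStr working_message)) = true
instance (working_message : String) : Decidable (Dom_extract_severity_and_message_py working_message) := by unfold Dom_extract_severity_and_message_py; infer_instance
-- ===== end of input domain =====

-- B replaces A's loop over four "keyword:" prefixes by a single partition at the first colon plus one set-membership test (idiomatic).

-- ===== PORT A =====
-- the for-loop over severity_indicators, in order
def pvLoopA (working_message : String) : List String → String × String
  | [] => ("error", working_message)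
  | indicator :: rest =>
    if PySem.Str.startswith (PySem.Str.lower working_message) indicator then
      (PySem.Str.slice indicator none (some (-1)),
       PySem.Str.strip (PySem.Str.slice working_message (some (PySem.Str.len indicator)) none))
    else pvLoopA working_message rest

def extract_severity_and_message_py (working_message : String) : String × String :=
  pvLoopA working_message ["error:", "warning:", "note:", "info:"]

-- ===== PORT B =====
-- s.partition(":"): ported by hand via find + slices (exact: str.partition splits at the FIRST occurrence, or returns (s, "", ""))
def pvPartitionColon (s : String) : String × String × String :=
  if PySem.Str.find s ":" = -1 then (s, "", "")
  else (PySem.Str.slice s none (some (PySem.Str.find s ":")), ":",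
        PySem.Str.slice s (some (PySem.Str.find s ":" + 1)) none)

def extract_severity_and_message_py_alt (working_message : String) : String × String :=
  let p := pvPartitionColon working_message
  if p.2.1 ≠ "" ∧ PySem.Str.lower p.1 ∈ (["error", "warning", "note", "info"] : List String) then
    (PySem.Str.lower p.1, PySem.Str.strip p.2.2)
  else ("error", working_message)

-- ===== PRECONDITION & SPEC =====
def Spec_extract_severity_and_message_py (working_message : String) (out : String × String) : Prop := out = extract_severity_and_message_py_alt working_message
instance (working_message : String) (out : String × String) : Decidable (Spec_extract_severity_and_message_py working_message out) := by unfold Spec_extract_severity_and_message_py; infer_instance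

-- ===== CLAIM (what is proved, stated in full; the proofs are below) =====
def Claim_equal_extract_severity_and_message_py : Prop := ∀ (working_message : String), Dom_extract_severity_and_message_py working_message → Spec_extract_severity_and_message_py working_message (extract_severity_and_message_py working_message)

-- ===== LEMMAS AND PROOFS =====

theorem pvLowerChar_eq_colon_iff (c : Char) : PySem.Chars.lowerChar c = ':' ↔ c = ':' := by
  constructor
  · intro h
    unfold PySem.Chars.lowerChar at h
    split at h
    · rename_i hu
      simp only [PySem.Chars.isupper, Bool.and_eq_true, decide_eq_true_eq, Char.le_def] at hu
      have h1 : 65 ≤ c.toNat := hu.1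
      have h2 : c.toNat ≤ 90 := hu.2
      have hv : Nat.isValidChar (c.toNat + 32) := by unfold Nat.isValidChar; left; omega
      have h3 := congrArg Char.toNat h
      rw [Char.toNat_ofNat, if_pos hv] at h3
      have h4 : (':' : Char).toNat = 58 := by decide
      omega
    · exact h
  · intro h; subst h; decide

theorem pvSingleton_prefix_iff (l : List Char) (a : Char) : [a] <+: l ↔ l.head? = some a := by
  constructor
  · rintro ⟨t, rfl⟩; rfl
  · intro h
    cases l with
    | nil => simp at h
    | cons x xs => simp at h; subst h; exact ⟨xs, rfl⟩

theorem pvFind_colon_eq_iff (cs : List Char) (k : Nat) :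
    PySem.Chars.find cs [':'] = (k : Int) ↔ (cs[k]? = some ':' ∧ ∀ j < k, cs[j]? ≠ some ':') := by
  constructor
  · intro h
    have h0 : 0 ≤ PySem.Chars.find cs [':'] := by rw [h]; exact Int.natCast_nonneg k
    have spec := PySem.Chars.find_spec h0
    rw [h] at spec
    simp only [Int.toNat_natCast] at spec
    refine ⟨?_, ?_⟩
    · rw [← List.head?_drop]
      exact (pvSingleton_prefix_iff _ _).mp spec.1
    · intro j hj hcontra
      exact spec.2 j hj ((pvSingleton_prefix_iff _ _).mpr (by rw [List.head?_drop]; exact hcontra))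
  · rintro ⟨h1, h2⟩
    have hpref : [':'] <+: cs.drop k := (pvSingleton_prefix_iff _ _).mpr (by rw [List.head?_drop]; exact h1)
    have hinf : [':'] <:+: cs := hpref.isInfix.trans (cs.drop_suffix k).isInfix
    have hne : PySem.Chars.find cs [':'] ≠ -1 := by
      rw [Ne, PySem.Chars.find_eq_neg_one_iff, not_not]; exact hinf
    have hge : -1 ≤ PySem.Chars.find cs [':'] := PySem.Chars.neg_one_le_find cs [':']
    have h0 : 0 ≤ PySem.Chars.find cs [':'] := by omega
    have spec := PySem.Chars.find_spec h0
    have hf1 : cs[(PySem.Chars.find cs [':']).toNat]? = some ':' := by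
      rw [← List.head?_drop]; exact (pvSingleton_prefix_iff _ _).mp spec.1
    rcases Nat.lt_trichotomy (PySem.Chars.find cs [':']).toNat k with hlt | heq | hgt
    · exact absurd hf1 (h2 _ hlt)
    · omega
    · exact absurd hpref (spec.2 k hgt)

-- the core correspondence: A's "lower(s).startswith(w + ':')" holds exactly when the first colon of s
-- is at position |w| and the lowered text before it is w (for a colon-free w)
theorem pvMatch_iff (cs w : List Char) (hno : ':' ∉ w) :
    (w ++ [':']) <+: PySem.Chars.lower cs ↔
      (PySem.Chars.find cs [':'] = (w.length : Int) ∧ PySem.Chars.lower (cs.take w.length) = w) := by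
  simp only [PySem.Chars.lower]
  constructor
  · intro h
    have htake := List.prefix_iff_eq_take.mp h
    simp only [List.length_append, List.length_cons, List.length_nil] at htake
    -- htake : w ++ [':'] = (cs.map lowerChar).take (w.length + 1)
    have hlen : w.length + 1 ≤ cs.length := by
      have := congrArg List.length htake
      simp only [List.length_append, List.length_take, List.length_map, List.length_cons,
        List.length_nil] at this
      omega
    have helem : ∀ j, j < w.length + 1 → (w ++ [':'])[j]? = cs[j]?.map PySem.Chars.lowerChar := by
      intro j hj
      rw [htake, List.getElem?_take_of_lt hj, List.getElem?_map]
    have hcolon : cs[w.length]? = some ':' := by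
      have := helem w.length (by omega)
      rw [List.getElem?_append_right (le_refl _)] at this
      simp only [Nat.sub_self, List.getElem?_cons_zero] at this
      rcases Option.map_eq_some_iff.mp this.symm with ⟨c, hc, hlc⟩
      rw [hc, (pvLowerChar_eq_colon_iff c).mp hlc]
    have hbefore : ∀ j, j < w.length → cs[j]? ≠ some ':' := by
      intro j hj hcontra
      have := helem j (by omega)
      rw [hcontra] at this
      simp only [Option.map_some] at this
      rw [List.getElem?_append_left hj] at this
      have hmem : ':' ∈ w := by
        have : w[j]? = some ':' := by rw [this]; decide
        exact List.mem_of_getElem? this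
      exact hno hmem
    refine ⟨(pvFind_colon_eq_iff cs w.length).mpr ⟨hcolon, hbefore⟩, ?_⟩
    have hw : w = ((cs.map PySem.Chars.lowerChar).take (w.length + (0 + 1))).take w.length := by
      conv_lhs => rw [show w = (w ++ [':']).take w.length from by simp]
      rw [← htake]
    rw [List.take_take] at hw
    have hmin : min w.length (w.length + (0 + 1)) = w.length := by omega
    rw [hmin, ← List.map_take] at hw
    exact hw.symm
  · rintro ⟨hfind, hlow⟩
    have hspec := (pvFind_colon_eq_iff cs w.length).mp hfind
    have hklt : w.length < cs.length := by
      rcases List.getElem?_eq_some_iff.mp hspec.1 with ⟨h, _⟩; exact h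
    rw [List.prefix_iff_eq_take]
    simp only [List.length_append, List.length_cons, List.length_nil]
    rw [show w.length + (0 + 1) = w.length + 1 from by omega]
    rw [← List.map_take, List.take_add_one, hspec.1]
    simp only [Option.toList_some, List.map_append, List.map_cons, List.map_nil]
    rw [hlow]
    congr 1

-- A's loop test for one indicator, rephrased: the first colon sits right after the (lowered) word
theorem pvCond_iff (wm ind : String) (w : List Char) (hind : ind.toList = w ++ [':'])
    (hno : ':' ∉ w) (k : Nat) (hk : PySem.Chars.find wm.toList [':'] = (k : Int)) :
    PySem.Str.startswith (PySem.Str.lower wm) ind = true ↔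
      (k = w.length ∧ PySem.Chars.lower (wm.toList.take k) = w) := by
  rw [PySem.Str.startswith_eq, PySem.Str.toList_lower, hind,
    PySem.Chars.startswith_iff, pvMatch_iff _ _ hno]
  constructor
  · rintro ⟨hf, hl⟩
    have hkl : k = w.length := by rw [hk] at hf; exact_mod_cast hf
    exact ⟨hkl, by rw [hkl]; exact hl⟩
  · rintro ⟨hkl, hl⟩
    exact ⟨by rw [hk, hkl], by rw [← hkl]; exact hl⟩

theorem pvOfList_eq (l : List Char) (t : String) (h : String.ofList l = t) : l = t.toList := by
  rw [← h, String.toList_ofList]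

-- the value A returns on a matched indicator equals B's (lowered head, stripped tail)
theorem pvMatchedCase (wm : String) (k : Nat) (w : List Char) (ind : String)
    (hind : ind.toList = w ++ [':'])
    (hlenind : PySem.Str.len ind = ((w.length + 1 : Nat) : Int))
    (hH : PySem.Chars.lower (wm.toList.take k) = w) (hk : k = w.length) :
    (PySem.Str.slice ind none (some (-1)),
     PySem.Str.strip (PySem.Str.slice wm (some (PySem.Str.len ind)) none))
    = (String.ofList (PySem.Chars.lower (wm.toList.take k)),
       PySem.Str.strip (String.ofList (wm.toList.drop (k + 1)))) := by
  simp only [Prod.mk.injEq]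
  constructor
  · rw [hH]
    simp only [PySem.Str.slice, PySem.Chars.slice, PySem.List.slice_to_neg_one, hind,
      List.dropLast_concat]
  · rw [hlenind, hk]
    simp only [PySem.Str.slice, PySem.Chars.slice, PySem.List.slice_from_natCast]

-- ===== VERDICT (by name: the statement is the Claim_ definition above) =====
theorem extract_severity_and_message_py_spec : Claim_equal_extract_severity_and_message_py := by
  unfold Claim_equal_extract_severity_and_message_py Spec_extract_severity_and_message_py
  intro wm _
  by_cases hneg : PySem.Str.find wm ":" = -1
  · -- no colon: both sides fall through to ("error", wm)
    have hf : PySem.Chars.find wm.toList [':'] = -1 := hneg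
    have hfalse : ∀ (ind : String) (w : List Char), ind.toList = w ++ [':'] → ':' ∉ w →
        PySem.Str.startswith (PySem.Str.lower wm) ind = false := by
      intro ind w hind hno
      rw [Bool.eq_false_iff]
      intro hc
      rw [PySem.Str.startswith_eq, PySem.Str.toList_lower, hind,
        PySem.Chars.startswith_iff, pvMatch_iff _ _ hno] at hc
      have h1 := hc.1
      rw [hf] at h1
      omega
    have hc1 := hfalse "error:" ['e','r','r','o','r'] rfl (by decide)
    have hc2 := hfalse "warning:" ['w','a','r','n','i','n','g'] rfl (by decide)
    have hc3 := hfalse "note:" ['n','o','t','e'] rfl (by decide)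
    have hc4 := hfalse "info:" ['i','n','f','o'] rfl (by decide)
    simp only [extract_severity_and_message_py, pvLoopA, hc1, hc2, hc3, hc4,
      Bool.false_eq_true, if_false]
    have halt : extract_severity_and_message_py_alt wm = ("error", wm) := by
      simp [extract_severity_and_message_py_alt, pvPartitionColon, hf]
    rw [halt]
  · -- the first colon is at position k
    have h0 : 0 ≤ PySem.Str.find wm ":" := by
      have h1 := PySem.Chars.neg_one_le_find wm.toList [':']
      have hne : PySem.Chars.find wm.toList [':'] ≠ -1 := hneg
      rw [show PySem.Str.find wm ":" = PySem.Chars.find wm.toList [':'] from rfl]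
      omega
    set k : Nat := (PySem.Str.find wm ":").toNat with hkdef
    have hk : PySem.Chars.find wm.toList [':'] = (k : Int) := (Int.toNat_of_nonneg h0).symm
    have hfind : PySem.Str.find wm ":" = (k : Int) := hk
    have hspec := (pvFind_colon_eq_iff wm.toList k).mp hk
    have hklt : k < wm.toList.length := (List.getElem?_eq_some_iff.mp hspec.1).1
    have hhead : PySem.Str.lower (PySem.Str.slice wm none (some (PySem.Str.find wm ":")))
        = String.ofList (PySem.Chars.lower (wm.toList.take k)) := by
      rw [hfind]
      simp only [PySem.Str.lower, PySem.Str.slice, String.toList_ofList, PySem.Chars.slice,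
        PySem.List.slice_to_natCast]
    have htail : PySem.Str.slice wm (some (PySem.Str.find wm ":" + 1)) none
        = String.ofList (wm.toList.drop (k + 1)) := by
      rw [hfind, show ((k : Int) + 1) = ((k + 1 : Nat) : Int) from by push_cast; ring]
      simp only [PySem.Str.slice, PySem.Chars.slice, PySem.List.slice_from_natCast]
    have hHlen : (PySem.Chars.lower (wm.toList.take k)).length = k := by
      simp only [PySem.Chars.lower, List.length_map, List.length_take]
      omega
    have halt : extract_severity_and_message_py_alt wm
        = (if String.ofList (PySem.Chars.lower (wm.toList.take k)) ∈ (["error", "warning", "note", "info"] : List String)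
           then (String.ofList (PySem.Chars.lower (wm.toList.take k)),
                 PySem.Str.strip (String.ofList (wm.toList.drop (k + 1))))
           else ("error", wm)) := by
      simp only [extract_severity_and_message_py_alt, pvPartitionColon, if_neg hneg]
      rw [hhead, htail]
      simp
    have c1 := pvCond_iff wm "error:" ['e','r','r','o','r'] rfl (by decide) k hk
    have c2 := pvCond_iff wm "warning:" ['w','a','r','n','i','n','g'] rfl (by decide) k hk
    have c3 := pvCond_iff wm "note:" ['n','o','t','e'] rfl (by decide) k hk
    have c4 := pvCond_iff wm "info:" ['i','n','f','o'] rfl (by decide) k hk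
    by_cases he : PySem.Chars.lower (wm.toList.take k) = "error".toList
    · have hk5 : k = 5 := by
        rw [he, show ("error".toList).length = 5 from by decide] at hHlen; omega
      have hc1 : PySem.Str.startswith (PySem.Str.lower wm) "error:" = true :=
        c1.mpr ⟨by simpa using hk5, he.trans (by decide)⟩
      simp only [extract_severity_and_message_py, pvLoopA, hc1, if_true]
      rw [halt, if_pos (by rw [he, String.ofList_toList]; simp)]
      exact pvMatchedCase wm k ['e','r','r','o','r'] "error:" rfl (by decide)
        (he.trans (by decide)) (by simpa using hk5)
    · by_cases hw : PySem.Chars.lower (wm.toList.take k) = "warning".toList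
      · have hk7 : k = 7 := by
          rw [hw, show ("warning".toList).length = 7 from by decide] at hHlen; omega
        have hc1 : PySem.Str.startswith (PySem.Str.lower wm) "error:" = false := by
          rw [Bool.eq_false_iff]
          intro hc
          exact he (by rw [(c1.mp hc).2]; decide)
        have hc2 : PySem.Str.startswith (PySem.Str.lower wm) "warning:" = true :=
          c2.mpr ⟨by simpa using hk7, hw.trans (by decide)⟩
        simp only [extract_severity_and_message_py, pvLoopA, hc1, hc2,
          Bool.false_eq_true, if_false, if_true]
        rw [halt, if_pos (by rw [hw, String.ofList_toList]; simp)]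
        exact pvMatchedCase wm k ['w','a','r','n','i','n','g'] "warning:" rfl (by decide)
          (hw.trans (by decide)) (by simpa using hk7)
      · by_cases hn : PySem.Chars.lower (wm.toList.take k) = "note".toList
        · have hk4 : k = 4 := by
            rw [hn, show ("note".toList).length = 4 from by decide] at hHlen; omega
          have hc1 : PySem.Str.startswith (PySem.Str.lower wm) "error:" = false := by
            rw [Bool.eq_false_iff]; intro hc; exact he (by rw [(c1.mp hc).2]; decide)
          have hc2 : PySem.Str.startswith (PySem.Str.lower wm) "warning:" = false := by
            rw [Bool.eq_false_iff]; intro hc; exact hw (by rw [(c2.mp hc).2]; decide)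
          have hc3 : PySem.Str.startswith (PySem.Str.lower wm) "note:" = true :=
            c3.mpr ⟨by simpa using hk4, hn.trans (by decide)⟩
          simp only [extract_severity_and_message_py, pvLoopA, hc1, hc2, hc3,
            Bool.false_eq_true, if_false, if_true]
          rw [halt, if_pos (by rw [hn, String.ofList_toList]; simp)]
          exact pvMatchedCase wm k ['n','o','t','e'] "note:" rfl (by decide)
            (hn.trans (by decide)) (by simpa using hk4)
        · by_cases hi : PySem.Chars.lower (wm.toList.take k) = "info".toList
          · have hk4 : k = 4 := by
              rw [hi, show ("info".toList).length = 4 from by decide] at hHlen; omega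
            have hc1 : PySem.Str.startswith (PySem.Str.lower wm) "error:" = false := by
              rw [Bool.eq_false_iff]; intro hc; exact he (by rw [(c1.mp hc).2]; decide)
            have hc2 : PySem.Str.startswith (PySem.Str.lower wm) "warning:" = false := by
              rw [Bool.eq_false_iff]; intro hc; exact hw (by rw [(c2.mp hc).2]; decide)
            have hc3 : PySem.Str.startswith (PySem.Str.lower wm) "note:" = false := by
              rw [Bool.eq_false_iff]; intro hc; exact hn (by rw [(c3.mp hc).2]; decide)
            have hc4 : PySem.Str.startswith (PySem.Str.lower wm) "info:" = true :=
              c4.mpr ⟨by simpa using hk4, hi.trans (by decide)⟩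
            simp only [extract_severity_and_message_py, pvLoopA, hc1, hc2, hc3, hc4,
              Bool.false_eq_true, if_false, if_true]
            rw [halt, if_pos (by rw [hi, String.ofList_toList]; simp)]
            exact pvMatchedCase wm k ['i','n','f','o'] "info:" rfl (by decide)
              (hi.trans (by decide)) (by simpa using hk4)
          · -- lowered head is none of the four words: both sides default
            have hc1 : PySem.Str.startswith (PySem.Str.lower wm) "error:" = false := by
              rw [Bool.eq_false_iff]; intro hc; exact he (by rw [(c1.mp hc).2]; decide)
            have hc2 : PySem.Str.startswith (PySem.Str.lower wm) "warning:" = false := by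
              rw [Bool.eq_false_iff]; intro hc; exact hw (by rw [(c2.mp hc).2]; decide)
            have hc3 : PySem.Str.startswith (PySem.Str.lower wm) "note:" = false := by
              rw [Bool.eq_false_iff]; intro hc; exact hn (by rw [(c3.mp hc).2]; decide)
            have hc4 : PySem.Str.startswith (PySem.Str.lower wm) "info:" = false := by
              rw [Bool.eq_false_iff]; intro hc; exact hi (by rw [(c4.mp hc).2]; decide)
            simp only [extract_severity_and_message_py, pvLoopA, hc1, hc2, hc3, hc4,
              Bool.false_eq_true, if_false]
            rw [halt, if_neg]
            intro hmem
            simp only [List.mem_cons, List.not_mem_nil, or_false] at hmem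
            rcases hmem with h | h | h | h
            · exact he (pvOfList_eq _ _ h)
            · exact hw (pvOfList_eq _ _ h)
            · exact hn (pvOfList_eq _ _ h)
            · exact hi (pvOfList_eq _ _ h)
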